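-- pv_equiv track=rewrite | github.com/sauravbhattacharya001/VoronoiMap | vormap_automata.py | _step_majority
-- ===== SOURCE A (Python) =====
-- from collections import Counter
-- from typing import Any, Callable, Dict, List, Optional, Tuple
--
-- def _step_majority(states: Dict, adjacency: Dict, num_states: int = 2) -> Dict:
--     """Majority rule: each cell adopts the most common neighbour state."""
--     new_states = {}
--     for seed, state in states.items():
--         neighbors = adjacency.get(seed, [])
--         if not neighbors:
--             new_states[seed] = state
--             continue
--
--         counts: Counter = Counter()
--         for nb in neighbors:
--             counts[states.get(nb, 0)] += 1
--
--         max_count = max(counts.values())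
--         candidates = [s for s, c in counts.items() if c == max_count]
--
--         if len(candidates) == 1:
--             new_states[seed] = candidates[0]
--         else:
--             # Tie: keep current state if it's among the tied, else pick lowest
--             new_states[seed] = state if state in candidates else min(candidates)
--
--     return new_states
-- ===== SOURCE B (Python) =====
-- def _step_majority(states, adjacency, num_states=2):
--     """Majority rule via sort-and-scan: no Counter/hash tally at all.
--
--     Per cell, the neighbour states are sorted; one scan over the runs of
--     equal values keeps the best (count, state) seen, replacing on a strictly
--     larger run or on an equal run that is the cell's current state.  Scanning
--     ascending makes the kept tie automatically the lowest value.
--     """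
--     new_states = {}
--     for seed, state in states.items():
--         neighbors = adjacency.get(seed, [])
--         if not neighbors:
--             new_states[seed] = state
--             continue
--         vals = sorted(states.get(nb, 0) for nb in neighbors)
--         best_s = None
--         best_c = 0
--         i = 0
--         n = len(vals)
--         while i < n:
--             j = i
--             while j < n and vals[j] == vals[i]:
--                 j += 1
--             c = j - i
--             s = vals[i]
--             if c > best_c or (c == best_c and s == state):
--                 best_s, best_c = s, c
--             i = j
--         new_states[seed] = best_s
--     return new_states
-- ===== Notes on version B (the rewrite author's own statement) =====
-- stated objective: alternative
-- what changed: A tallies neighbour states in a Counter, takes the max count, filters a candidates list and branches on the tie; B uses no hash tally at all: it sorts each cell's neighbour states and makes one scan over the runs of equal values, keeping the best (count, state) pair, which realises both tie-break rules through the ascending scan order.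
import Mathlib
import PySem

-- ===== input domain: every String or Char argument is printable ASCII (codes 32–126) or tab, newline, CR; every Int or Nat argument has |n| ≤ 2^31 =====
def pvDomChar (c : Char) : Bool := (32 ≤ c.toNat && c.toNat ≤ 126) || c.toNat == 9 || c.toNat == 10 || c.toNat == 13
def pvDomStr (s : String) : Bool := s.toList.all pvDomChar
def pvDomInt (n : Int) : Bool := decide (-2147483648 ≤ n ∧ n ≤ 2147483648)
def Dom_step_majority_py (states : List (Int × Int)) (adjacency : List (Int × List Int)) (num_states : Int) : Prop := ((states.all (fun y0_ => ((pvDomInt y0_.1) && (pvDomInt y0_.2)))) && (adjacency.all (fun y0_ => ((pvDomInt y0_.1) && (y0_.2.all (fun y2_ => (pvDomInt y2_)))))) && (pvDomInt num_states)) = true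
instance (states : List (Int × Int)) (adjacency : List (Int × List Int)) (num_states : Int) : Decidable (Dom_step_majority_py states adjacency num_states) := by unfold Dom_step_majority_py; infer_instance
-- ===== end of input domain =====

-- B replaces A's Counter tally / max-count / candidate-filter / tie-branch by a sort of the
-- neighbour states and one scan over the runs of equal values (objective: alternative);
-- equivalence is on the return value.

-- ===== PORT A =====
-- literal transliteration of _step_majority; the .getD guards on max?/headD/min? are
-- unreachable (counts/candidates are nonempty exactly where Python evaluates them)
def step_majority_py (states : List (Int × Int)) (adjacency : List (Int × List Int)) (num_states : Int) : List (Int × Int) :=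
  (states.foldl (fun new_states (p : Int × Int) =>
    let seed := p.1
    let state := p.2
    let neighbors := (PySem.Dict.mk adjacency).getD seed []
    if neighbors = [] then
      new_states.insert seed state
    else
      let counts := neighbors.foldl
        (fun c nb => c.modify ((PySem.Dict.mk states).getD nb 0) 0 (· + 1))
        (PySem.Dict.empty : PySem.Dict Int Int)
      let max_count := (PySem.List.max? counts.values (fun v => v)).getD 0
      let candidates := (counts.items.filter (fun q => q.2 == max_count)).map (·.1)
      if candidates.length = 1 then
        new_states.insert seed (candidates.headD 0)
      else
        new_states.insert seed
          (if state ∈ candidates then state else (PySem.List.min? candidates (fun v => v)).getD 0)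
    ) (PySem.Dict.empty : PySem.Dict Int Int)).items

-- ===== PORT B =====
-- the inner while loop of Source B: split the sorted value list into runs (value, run length)
def pvRuns (xs : List Int) : List (Int × Int) :=
  match xs with
  | [] => []
  | x :: rest =>
      (x, ((rest.takeWhile (· == x)).length : Int) + 1) ::
        pvRuns (rest.dropWhile (· == x))
termination_by xs.length
decreasing_by
  simp only [List.length_cons]
  exact Nat.lt_succ_of_le (List.length_dropWhile_le _ _)

-- the outer while loop of Source B: keep the best (state, count) seen over the runs
def pvScan (state : Int) (runs : List (Int × Int)) : Option Int × Int :=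
  runs.foldl
    (fun acc r => if acc.2 < r.2 || (r.2 == acc.2 && r.1 == state) then (some r.1, r.2) else acc)
    (none, 0)

-- per-cell winner of Source B: sort the neighbour states, scan the runs
def pvPick (states : List (Int × Int)) (adjacency : List (Int × List Int)) (seed state : Int) : Int :=
  let neighbors := (PySem.Dict.mk adjacency).getD seed []
  if neighbors = [] then state
  else
    let vals := PySem.List.sorted (neighbors.map (fun nb => (PySem.Dict.mk states).getD nb 0)) (fun v => v) false
    ((pvScan state (pvRuns vals)).1).getD 0  -- unreachable guard: vals is nonempty, best_s is set

def step_majority_py_alt (states : List (Int × Int)) (adjacency : List (Int × List Int)) (num_states : Int) : List (Int × Int) :=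
  (states.foldl (fun new_states (p : Int × Int) =>
      new_states.insert p.1 (pvPick states adjacency p.1 p.2))
    (PySem.Dict.empty : PySem.Dict Int Int)).items

-- ===== PRECONDITION & SPEC =====
def Spec_step_majority_py (states : List (Int × Int)) (adjacency : List (Int × List Int)) (num_states : Int) (out : List (Int × Int)) : Prop := out = step_majority_py_alt states adjacency num_states
instance (states : List (Int × Int)) (adjacency : List (Int × List Int)) (num_states : Int) (out : List (Int × Int)) : Decidable (Spec_step_majority_py states adjacency num_states out) := by unfold Spec_step_majority_py; infer_instance

-- ===== CLAIM (what is proved, stated in full; the proofs are below) =====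
def Claim_equal_step_majority_py : Prop := ∀ (states : List (Int × Int)) (adjacency : List (Int × List Int)) (num_states : Int), Dom_step_majority_py states adjacency num_states → Spec_step_majority_py states adjacency num_states (step_majority_py states adjacency num_states)

-- ===== LEMMAS AND PROOFS =====

-- A's per-cell selection (max count, candidate filter, tie branch), factored out of the fold
def pvSelA (states : List (Int × Int)) (adjacency : List (Int × List Int)) (seed state : Int) : Int :=
  let neighbors := (PySem.Dict.mk adjacency).getD seed []
  if neighbors = [] then state
  else
    let counts := neighbors.foldl
      (fun c nb => c.modify ((PySem.Dict.mk states).getD nb 0) 0 (· + 1))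
      (PySem.Dict.empty : PySem.Dict Int Int)
    let max_count := (PySem.List.max? counts.values (fun v => v)).getD 0
    let candidates := (counts.items.filter (fun q => q.2 == max_count)).map (·.1)
    if candidates.length = 1 then candidates.headD 0
    else if state ∈ candidates then state
    else (PySem.List.min? candidates (fun v => v)).getD 0

-- the composite key (-count, s ≠ state, s): a strict total order whose minimum is the
-- common winner of both selections; pvKeyLt is its lexicographic comparison
def pvKeyLt (a b : Int × Int × Int) : Bool :=
  decide (a.1 < b.1) ||
    (a.1 == b.1 && (decide (a.2.1 < b.2.1) || (a.2.1 == b.2.1 && decide (a.2.2 < b.2.2))))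

def pvMinBy (key : Int → Int × Int × Int) (xs : List Int) : Option Int :=
  xs.foldl (fun acc x =>
    match acc with
    | none => some x
    | some m => if pvKeyLt (key x) (key m) then some x else some m) none

theorem pvKeyLt_iff (a b : Int × Int × Int) :
    pvKeyLt a b = true ↔
      (a.1 < b.1 ∨ (a.1 = b.1 ∧ (a.2.1 < b.2.1 ∨ (a.2.1 = b.2.1 ∧ a.2.2 < b.2.2)))) := by
  simp [pvKeyLt]

theorem pvKeyLt_irrefl (a : Int × Int × Int) : pvKeyLt a a = false := by
  simp [pvKeyLt]

theorem pvKeyLt_trans {a b c : Int × Int × Int}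
    (h1 : pvKeyLt a b = true) (h2 : pvKeyLt b c = true) : pvKeyLt a c = true := by
  rw [pvKeyLt_iff] at h1 h2 ⊢
  omega

theorem pvKeyLt_false_lt {a b c : Int × Int × Int}
    (h1 : pvKeyLt a b = false) (h2 : pvKeyLt a c = true) : pvKeyLt b c = true := by
  have h1' : ¬ (a.1 < b.1 ∨ (a.1 = b.1 ∧ (a.2.1 < b.2.1 ∨ (a.2.1 = b.2.1 ∧ a.2.2 < b.2.2)))) := by
    rw [← pvKeyLt_iff, h1]; simp
  rw [pvKeyLt_iff] at h2 ⊢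
  omega

theorem pvKeyLt_total {a b : Int × Int × Int}
    (h1 : pvKeyLt a b = false) (h2 : pvKeyLt b a = false) : a = b := by
  obtain ⟨a1, a2, a3⟩ := a; obtain ⟨b1, b2, b3⟩ := b
  simp [pvKeyLt] at h1 h2
  simp only [Prod.mk.injEq]
  omega

theorem pvMinBy_aux (key : Int → Int × Int × Int) : ∀ (xs : List Int) (m : Int),
    ∃ b, xs.foldl (fun acc x =>
        match acc with
        | none => some x
        | some m => if pvKeyLt (key x) (key m) then some x else some m) (some m) = some b ∧
      (b = m ∨ b ∈ xs) ∧ pvKeyLt (key m) (key b) = false ∧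
      ∀ y ∈ xs, pvKeyLt (key y) (key b) = false := by
  intro xs
  induction xs with
  | nil => intro m; exact ⟨m, rfl, Or.inl rfl, pvKeyLt_irrefl _, by simp⟩
  | cons x xs ih =>
    intro m
    by_cases h : pvKeyLt (key x) (key m) = true
    · obtain ⟨b, hfold, hmem, hbx, hall⟩ := ih x
      refine ⟨b, ?_, ?_, ?_, ?_⟩
      · simpa [List.foldl_cons, h] using hfold
      · rcases hmem with rfl | hb
        · exact Or.inr (List.mem_cons_self ..)
        · exact Or.inr (List.mem_cons_of_mem _ hb)
      · by_contra hmb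
        rw [Bool.not_eq_false] at hmb
        have := pvKeyLt_trans h hmb
        rw [hbx] at this; cases this
      · intro y hy
        rcases List.mem_cons.mp hy with rfl | hy'
        · exact hbx
        · exact hall y hy'
    · rw [Bool.not_eq_true] at h
      obtain ⟨b, hfold, hmem, hbm, hall⟩ := ih m
      refine ⟨b, ?_, ?_, hbm, ?_⟩
      · simpa [List.foldl_cons, h] using hfold
      · rcases hmem with rfl | hb
        · exact Or.inl rfl
        · exact Or.inr (List.mem_cons_of_mem _ hb)
      · intro y hy
        rcases List.mem_cons.mp hy with rfl | hy'
        · by_contra hxb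
          rw [Bool.not_eq_false] at hxb
          have := pvKeyLt_false_lt h hxb
          rw [hbm] at this; cases this
        · exact hall y hy'

theorem pvMinBy_spec (key : Int → Int × Int × Int) (xs : List Int) (hne : xs ≠ []) :
    ∃ b, pvMinBy key xs = some b ∧ b ∈ xs ∧ ∀ y ∈ xs, pvKeyLt (key y) (key b) = false := by
  cases xs with
  | nil => exact absurd rfl hne
  | cons x rest =>
    obtain ⟨b, hfold, hmem, hbx, hall⟩ := pvMinBy_aux key rest x
    refine ⟨b, ?_, ?_, ?_⟩
    · simpa [pvMinBy, List.foldl_cons] using hfold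
    · rcases hmem with rfl | hb
      · exact List.mem_cons_self ..
      · exact List.mem_cons_of_mem _ hb
    · intro y hy
      rcases List.mem_cons.mp hy with rfl | hy'
      · exact hbx
      · exact hall y hy'

-- the core per-cell fact about A: its max/filter/branch selection equals the keyed minimum
theorem pv_core (K : List Int) (cnt : Int → Int) (state m : Int) (cs : List Int)
    (hne : K ≠ [])
    (hm : PySem.List.max? (K.map cnt) (fun v => v) = some m)
    (hcsdef : cs = K.filter (fun k => cnt k == m)) :
    (if cs.length = 1 then cs.headD 0
     else if state ∈ cs then state
     else (PySem.List.min? cs (fun v => v)).getD 0)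
    = (match pvMinBy (fun s => (-(cnt s), (if s = state then (0 : Int) else 1), s)) K with
       | some s => s
       | none => state) := by
  set g := fun s => (-(cnt s), (if s = state then (0 : Int) else 1), s) with hg
  have hmaxV : ∀ v ∈ K.map cnt, v ≤ m := PySem.List.max?_isMax hm
  have hcnt_le : ∀ y ∈ K, cnt y ≤ m := fun y hy => hmaxV _ (List.mem_map_of_mem hy)
  obtain ⟨k0, hk0K, hk0⟩ := List.mem_map.mp (PySem.List.max?_mem hm)
  have hcs_mem : ∀ y, y ∈ cs ↔ y ∈ K ∧ cnt y = m := by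
    intro y; rw [hcsdef]; simp [List.mem_filter]
  have hk0cs : k0 ∈ cs := (hcs_mem k0).mpr ⟨hk0K, hk0⟩
  obtain ⟨b, hb_eq, hbK, hb_min⟩ := pvMinBy_spec g K hne
  rw [hb_eq]
  have key_uniq : ∀ a, a ∈ cs → (∀ y ∈ K, y ≠ a → pvKeyLt (g a) (g y) = true) → a = b := by
    intro a hacs hstr
    by_contra hab
    have h1 := hstr b hbK (fun e => hab e.symm)
    have h2 := hb_min a ((hcs_mem a).mp hacs).1
    rw [h1] at h2; cases h2
  have hlow : ∀ a ∈ cs, ∀ y, cnt y < m → pvKeyLt (g a) (g y) = true := by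
    intro a hacs y hylt
    rw [pvKeyLt_iff]
    have : cnt a = m := ((hcs_mem a).mp hacs).2
    left; simp only [hg]; omega
  by_cases hlen : cs.length = 1
  · rw [if_pos hlen]
    obtain ⟨c, hc⟩ := List.length_eq_one_iff.mp hlen
    have hccs : c ∈ cs := by rw [hc]; exact List.mem_cons_self ..
    rw [hc]; simp only [List.headD_cons]
    apply key_uniq c hccs
    intro y hyK hyne
    rcases lt_or_eq_of_le (hcnt_le y hyK) with hlt | heq
    · exact hlow c hccs y hlt
    · exact absurd (by rw [hc] at *; simpa using (hcs_mem y).mpr ⟨hyK, heq⟩) (by simpa [hc] using hyne)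
  · rw [if_neg hlen]
    by_cases hst : state ∈ cs
    · rw [if_pos hst]
      apply key_uniq state hst
      intro y hyK hyne
      rcases lt_or_eq_of_le (hcnt_le y hyK) with hlt | heq
      · exact hlow state hst y hlt
      · rw [pvKeyLt_iff]
        have h1 : cnt state = m := ((hcs_mem state).mp hst).2
        right
        constructor
        · simp only [hg]; omega
        · left; simp only [hg]
          rw [if_neg hyne]; norm_num
    · rw [if_neg hst]
      have hcs_ne : cs ≠ [] := fun h => by rw [h] at hk0cs; cases hk0cs
      cases hmin : PySem.List.min? cs (fun v => v) with
      | none => exact absurd ((PySem.List.min?_eq_none_iff cs _).mp hmin) hcs_ne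
      | some a =>
        simp only [Option.getD_some]
        have hacs : a ∈ cs := PySem.List.min?_mem hmin
        have hamin : ∀ y ∈ cs, a ≤ y := PySem.List.min?_isMin hmin
        apply key_uniq a hacs
        intro y hyK hyne
        rcases lt_or_eq_of_le (hcnt_le y hyK) with hlt | heq
        · exact hlow a hacs y hlt
        · have hycs : y ∈ cs := (hcs_mem y).mpr ⟨hyK, heq⟩
          have hane : a ≠ state := fun e => hst (e ▸ hacs)
          have hyne' : y ≠ state := fun e => hst (e ▸ hycs)
          rw [pvKeyLt_iff]
          right
          refine ⟨?_, Or.inr ⟨?_, ?_⟩⟩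
          · simp only [hg]
            have h1 : cnt a = m := ((hcs_mem a).mp hacs).2
            omega
          · simp only [hg]; simp [hane, hyne']
          · simp only [hg]
            exact lt_of_le_of_ne (hamin y hycs) (fun e => hyne e.symm)

-- run decomposition facts: on a ≤-sorted list, pvRuns yields strictly increasing keys
-- carrying exact multiplicities and covering every element
theorem pvRuns_spec : ∀ (xs : List Int), xs.Pairwise (· ≤ ·) →
    (∀ p ∈ pvRuns xs, p.1 ∈ xs ∧ p.2 = (xs.count p.1 : Int)) ∧
    ((pvRuns xs).map Prod.fst).Pairwise (· < ·) ∧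
    (∀ x ∈ xs, x ∈ (pvRuns xs).map Prod.fst) := by
  intro xs
  induction xs using pvRuns.induct with
  | case1 => intro _; refine ⟨by simp [pvRuns], by simp [pvRuns], by simp⟩
  | case2 x rest ih =>
    intro hp
    have htail : rest.Pairwise (· ≤ ·) := hp.tail
    have hle : ∀ y ∈ rest, x ≤ y := fun y hy => List.rel_of_pairwise_cons hp hy
    set tw := rest.takeWhile (· == x) with htw
    set r := rest.dropWhile (· == x) with hr
    have hsplit : tw ++ r = rest := List.takeWhile_append_dropWhile
    have htw_all : ∀ y ∈ tw, y = x := by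
      intro y hy
      have := List.mem_takeWhile_imp hy
      simpa using this
    have hrsub : ∀ y ∈ r, y ∈ rest := by
      intro y hy; rw [← hsplit]; exact List.mem_append_right _ hy
    have hrpw : r.Pairwise (· ≤ ·) := htail.sublist (List.dropWhile_sublist _)
    have hgt : ∀ y ∈ r, x < y := by
      intro y hy
      cases hrr : r with
      | nil => rw [hrr] at hy; cases hy
      | cons z r' =>
        have hzx : z ≠ x := by
          have hdrop : rest.dropWhile (· == x) = z :: r' := by rw [← hr, hrr]
          have hne : rest.dropWhile (· == x) ≠ [] := hdrop ▸ List.cons_ne_nil z r'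
          have h2 := List.head_dropWhile_not (· == x) (l := rest) hne
          have hz : (rest.dropWhile (· == x)).head hne = z := by simp [hdrop]
          rw [hz] at h2
          simpa using h2
        have hxz : x < z := lt_of_le_of_ne (hle z (hrsub z (by rw [hrr]; exact List.mem_cons_self ..))) (Ne.symm hzx)
        rw [hrr] at hy
        rcases List.mem_cons.mp hy with rfl | hy'
        · exact hxz
        · have : z ≤ y := List.rel_of_pairwise_cons (by rw [hrr] at hrpw; exact hrpw) hy'
          omega
    have hcount_x : (x :: rest).count x = tw.length + 1 := by
      rw [← hsplit, List.count_cons_self, List.count_append]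
      have h1 : tw.count x = tw.length := by
        rw [List.count_eq_length]
        intro y hy; exact (htw_all y hy) ▸ rfl
      have h2 : r.count x = 0 := by
        rw [List.count_eq_zero]
        intro hx; exact absurd (hgt x hx) (lt_irrefl x)
      omega
    have hcount_ne : ∀ k, x < k → (x :: rest).count k = r.count k := by
      intro k hk
      rw [← hsplit, List.count_cons_of_ne (by omega), List.count_append]
      have : tw.count k = 0 := by
        rw [List.count_eq_zero]
        intro hkx; have := htw_all k hkx; omega
      omega
    obtain ⟨ih1, ih2, ih3⟩ := ih hrpw
    refine ⟨?_, ?_, ?_⟩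
    · intro p hp'
      rw [pvRuns] at hp'
      rcases List.mem_cons.mp hp' with rfl | hp''
      · refine ⟨List.mem_cons_self .., ?_⟩
        simp only [← htw]
        rw [hcount_x]; push_cast; ring
      · obtain ⟨hmem, hcnt⟩ := ih1 p hp''
        refine ⟨List.mem_cons_of_mem _ (hrsub _ hmem), ?_⟩
        rw [hcnt, hcount_ne p.1 (hgt _ hmem)]
    · rw [pvRuns]
      simp only [List.map_cons]
      refine List.pairwise_cons.mpr ⟨?_, ih2⟩
      intro k hk
      obtain ⟨p, hpmem, hpk⟩ := List.mem_map.mp hk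
      exact hpk ▸ hgt _ (ih1 p hpmem).1
    · intro y hy
      rw [pvRuns]
      simp only [List.map_cons]
      rcases List.mem_cons.mp hy with rfl | hy'
      · exact List.mem_cons_self ..
      · rw [← hsplit] at hy'
        rcases List.mem_append.mp hy' with h | h
        · rw [htw_all y h]; exact List.mem_cons_self ..
        · exact List.mem_cons_of_mem _ (ih3 y h)

-- the scan over runs with strictly increasing keys computes the pvKeyLt-minimum
theorem pvCond_eq (cnt : Int → Int) (state b s : Int) (hbs : b < s) :
    ((decide (cnt b < cnt s)) || (cnt s == cnt b && s == state))
      = pvKeyLt (-(cnt s), (if s = state then (0 : Int) else 1), s)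
                (-(cnt b), (if b = state then (0 : Int) else 1), b) := by
  have hbne : b ≠ s := ne_of_lt hbs
  rw [Bool.eq_iff_iff]
  rw [pvKeyLt_iff]
  by_cases hs : s = state
  · have hb : b ≠ state := fun e => hbne (e.trans hs.symm)
    simp only [hs, if_neg hb]
    simp
  · simp only [if_neg hs]
    by_cases hb : b = state <;> simp [hs, hb] <;> omega

theorem pvScan_aux (state : Int) (cnt : Int → Int) :
    ∀ (R : List (Int × Int)) (b : Int),
    (∀ p ∈ R, b < p.1) → ((R.map Prod.fst).Pairwise (· < ·)) →
    (∀ p ∈ R, p.2 = cnt p.1) →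
    ∃ w, R.foldl
        (fun acc r => if acc.2 < r.2 || (r.2 == acc.2 && r.1 == state) then (some r.1, r.2) else acc)
        (some b, cnt b) = (some w, cnt w) ∧
      (w = b ∨ w ∈ R.map Prod.fst) ∧
      pvKeyLt ((fun s => (-(cnt s), (if s = state then (0 : Int) else 1), s)) b)
              ((fun s => (-(cnt s), (if s = state then (0 : Int) else 1), s)) w) = false ∧
      ∀ y ∈ R.map Prod.fst,
        pvKeyLt ((fun s => (-(cnt s), (if s = state then (0 : Int) else 1), s)) y)
                ((fun s => (-(cnt s), (if s = state then (0 : Int) else 1), s)) w) = false := by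
  intro R
  induction R with
  | nil =>
    intro b _ _ _
    exact ⟨b, rfl, Or.inl rfl, pvKeyLt_irrefl _, by simp⟩
  | cons r R' ih =>
    intro b hb hpw hcnt
    obtain ⟨s, c⟩ := r
    have hbs : b < s := hb (s, c) (List.mem_cons_self ..)
    have hc : c = cnt s := hcnt (s, c) (List.mem_cons_self ..)
    have hpw' : (R'.map Prod.fst).Pairwise (· < ·) := by
      simpa using hpw.tail
    have hs_lt : ∀ p ∈ R', s < p.1 := by
      intro p hp
      have := List.rel_of_pairwise_cons (by simpa using hpw) (List.mem_map_of_mem hp (f := Prod.fst))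
      exact this
    have hcnt' : ∀ p ∈ R', p.2 = cnt p.1 := fun p hp => hcnt p (List.mem_cons_of_mem _ hp)
    set g := fun t => (-(cnt t), (if t = state then (0 : Int) else 1), t) with hg
    have hcondeq : ((decide (cnt b < c)) || (c == cnt b && s == state)) = pvKeyLt (g s) (g b) := by
      rw [hc, hg]; exact pvCond_eq cnt state b s hbs
    simp only [List.foldl_cons]
    by_cases hcond : pvKeyLt (g s) (g b) = true
    · have : ((some b, cnt b).2 < (s, c).2 || ((s, c).2 == (some b, cnt b).2 && (s, c).1 == state)) = true := by
        simpa using hcondeq.trans hcond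
      rw [if_pos this]
      obtain ⟨w, hfold, hmem, hwmin, hall⟩ := ih s hs_lt hpw' hcnt'
      refine ⟨w, by rw [hc]; exact hfold, ?_, ?_, ?_⟩
      · rcases hmem with rfl | h
        · exact Or.inr (by simp)
        · exact Or.inr (by simp [h])
      · by_contra hbw
        rw [Bool.not_eq_false] at hbw
        have := pvKeyLt_trans hcond hbw
        rw [hwmin] at this; cases this
      · intro y hy
        simp only [List.map_cons, List.mem_cons] at hy
        rcases hy with rfl | hy'
        · exact hwmin
        · exact hall y hy'
    · rw [Bool.not_eq_true] at hcond
      have : ((some b, cnt b).2 < (s, c).2 || ((s, c).2 == (some b, cnt b).2 && (s, c).1 == state)) = false := by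
        simpa using hcondeq.trans hcond
      rw [if_neg (by rw [this]; exact Bool.false_ne_true)]
      have hb' : ∀ p ∈ R', b < p.1 := fun p hp => lt_trans hbs (hs_lt p hp)
      obtain ⟨w, hfold, hmem, hwmin, hall⟩ := ih b hb' hpw' hcnt'
      have hbs_lt : pvKeyLt (g b) (g s) = true := by
        have hcond' : ¬ ((g s).1 < (g b).1 ∨ ((g s).1 = (g b).1 ∧ ((g s).2.1 < (g b).2.1 ∨ ((g s).2.1 = (g b).2.1 ∧ (g s).2.2 < (g b).2.2)))) := by
          rw [← pvKeyLt_iff, hcond]; simp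
        rw [pvKeyLt_iff]
        simp only [hg] at hcond' ⊢
        by_cases h1 : b = state <;> by_cases h2 : s = state <;>
          simp [h1, h2] at hcond' ⊢ <;> omega
      refine ⟨w, hfold, ?_, hwmin, ?_⟩
      · rcases hmem with rfl | h
        · exact Or.inl rfl
        · exact Or.inr (by simp [h])
      · intro y hy
        simp only [List.map_cons, List.mem_cons] at hy
        rcases hy with rfl | hy'
        · by_contra hsw
          rw [Bool.not_eq_false] at hsw
          have := pvKeyLt_trans hbs_lt hsw
          rw [hwmin] at this; cases this
        · exact hall y hy'

-- per cell, A's selection equals B's sort-and-scan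
theorem pv_cell (states : List (Int × Int)) (adjacency : List (Int × List Int)) (seed state : Int) :
    pvSelA states adjacency seed state = pvPick states adjacency seed state := by
  simp only [pvSelA, pvPick]
  by_cases hnb : (PySem.Dict.mk adjacency).getD seed [] = []
  · simp [hnb]
  · rw [if_neg hnb, if_neg hnb]
    set neighbors := (PySem.Dict.mk adjacency).getD seed [] with hnbdef
    set vals := neighbors.map (fun nb => (PySem.Dict.mk states).getD nb 0) with hvals
    have hcounts : neighbors.foldl
        (fun c nb => c.modify ((PySem.Dict.mk states).getD nb 0) 0 (· + 1))
        (PySem.Dict.empty : PySem.Dict Int Int) = PySem.Dict.counter vals := by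
      rw [hvals, PySem.Dict.counter_eq_foldl, List.foldl_map]
    rw [hcounts]
    set K := PySem.Set.ofList vals with hK
    have hKkeys : (PySem.Dict.counter vals).keys = K := PySem.Dict.keys_counter vals
    have hvals_ne : vals ≠ [] := by
      rw [hvals]; simpa [List.map_eq_nil_iff] using hnb
    have hKne : K ≠ [] := by
      obtain ⟨v, hv⟩ := List.exists_mem_of_ne_nil _ hvals_ne
      exact List.ne_nil_of_mem ((PySem.Set.mem_ofList vals v).mpr hv)
    have hvalues : (PySem.Dict.counter vals).values = K.map (fun k => (vals.count k : Int)) := by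
      rw [PySem.Dict.values_eq_map_keys _ (PySem.Dict.nodup_keys_counter vals) 0, hKkeys]
      exact List.map_congr_left (fun k _ => by rw [PySem.Dict.getD_counter])
    rw [hvalues]
    cases hmax : PySem.List.max? (K.map (fun k => (vals.count k : Int))) (fun v => v) with
    | none =>
      exact absurd (by simpa [List.map_eq_nil_iff] using
        (PySem.List.max?_eq_none_iff _ _).mp hmax) hKne
    | some m =>
      simp only [Option.getD_some]
      have hcand : ((PySem.Dict.counter vals).items.filter (fun q => q.2 == m)).map (·.1)
          = K.filter (fun k => (vals.count k : Int) == m) := by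
        rw [PySem.Dict.items_counter, ← hK, List.filter_map, List.map_map]
        simp [Function.comp_def]
      rw [hcand]
      rw [pv_core K (fun k => (vals.count k : Int)) state m _ hKne hmax rfl]
      -- B side: the sorted list, its runs, and the scan
      set g := fun s => (-((vals.count s : Int)), (if s = state then (0 : Int) else 1), s) with hg
      set S := PySem.List.sorted vals (fun v => v) false with hS
      have hSpw : S.Pairwise (· ≤ ·) := by
        have := PySem.List.sorted_pairwise vals (fun v => v)
        simpa using this
      have hSne : S ≠ [] := by
        rw [hS, Ne, PySem.List.sorted_eq_nil_iff]; exact hvals_ne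
      have hSperm : S.Perm vals := PySem.List.sorted_perm ..
      have hcount_perm : ∀ k : Int, S.count k = vals.count k := fun k => hSperm.count_eq k
      have hmemS : ∀ k : Int, k ∈ S ↔ k ∈ vals := fun k => hSperm.mem_iff
      obtain ⟨hruns1, hruns2, hruns3⟩ := pvRuns_spec S hSpw
      cases hR : pvRuns S with
      | nil =>
        exfalso
        obtain ⟨x, hx⟩ := List.exists_mem_of_ne_nil S hSne
        have := hruns3 x hx
        rw [hR] at this
        simp at this
      | cons p R' =>
        obtain ⟨s1, c1⟩ := p
        have hp1 := hruns1 (s1, c1) (by rw [hR]; exact List.mem_cons_self ..)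
        have hc1 : c1 = ((vals.count s1 : Nat) : Int) := by
          have := hp1.2
          rwa [hcount_perm] at this
        have hc1pos : (0 : Int) < c1 := by
          have hmem : s1 ∈ vals := (hmemS s1).mp hp1.1
          rw [hc1]; exact_mod_cast List.count_pos_iff.mpr hmem
        -- the scan's first step fires (c1 > 0), seeding the accumulator with the first run
        have hstep : pvScan state ((s1, c1) :: R')
            = R'.foldl (fun acc r =>
                if acc.2 < r.2 || (r.2 == acc.2 && r.1 == state) then (some r.1, r.2) else acc)
              (some s1, c1) := by
          simp only [pvScan, List.foldl_cons]
          congr 1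
          have hcond : (((none : Option Int), (0 : Int)).2 < ((s1, c1) : Int × Int).2
              || (((s1, c1) : Int × Int).2 == (((none : Option Int), (0 : Int))).2
                  && ((s1, c1) : Int × Int).1 == state)) = true := by
            simp
            omega
          rw [if_pos hcond]
        -- the rest of the scan computes the keyed minimum over the run keys
        have haux := pvScan_aux state (fun k => ((vals.count k : Nat) : Int)) R' s1
          (by
            intro p hp
            have := List.rel_of_pairwise_cons (by rw [hR] at hruns2; simpa using hruns2)
              (List.mem_map_of_mem hp (f := Prod.fst))
            exact this)
          (by rw [hR] at hruns2; simpa using hruns2.tail)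
          (by
            intro p hp
            have := (hruns1 p (by rw [hR]; exact List.mem_cons_of_mem _ hp)).2
            rwa [hcount_perm] at this)
        obtain ⟨w, hfold, hwmem, hwmin, hwall⟩ := haux
        rw [hstep, hc1, hfold]
        -- A's keyed minimum over the distinct values
        obtain ⟨b, hb_eq, hbK, hb_min⟩ := pvMinBy_spec g K hKne
        rw [hb_eq]
        simp only [Option.getD_some]
        -- both are minimisers of the same key over the same set of values: they coincide
        have hkeymemS : ∀ y, (y = s1 ∨ y ∈ R'.map Prod.fst) → y ∈ S := by
          intro y hy
          rcases hy with rfl | hy'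
          · exact hp1.1
          · obtain ⟨p, hpmem, hpy⟩ := List.mem_map.mp hy'
            exact hpy ▸ (hruns1 p (by rw [hR]; exact List.mem_cons_of_mem _ hpmem)).1
        have hwK : w ∈ K := by
          rw [hK, PySem.Set.mem_ofList, ← hmemS]
          exact hkeymemS w hwmem
        have h1 : pvKeyLt (g w) (g b) = false := hb_min w hwK
        have h2 : pvKeyLt (g b) (g w) = false := by
          have hbS : b ∈ S := (hmemS b).mpr ((PySem.Set.mem_ofList vals b).mp (hK ▸ hbK))
          have := hruns3 b hbS
          rw [hR] at this
          simp only [List.map_cons, List.mem_cons] at this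
          rcases this with rfl | hb'
          · exact hwmin
          · exact hwall b hb'
        have := pvKeyLt_total h2 h1
        have := congrArg (fun t => t.2.2) this
        simp only [hg] at this
        exact this

theorem step_majority_py_spec : Claim_equal_step_majority_py := by
  intro states adjacency num_states _
  unfold Spec_step_majority_py step_majority_py step_majority_py_alt
  apply congrArg
  apply PySem.List.foldl_congr_mem
  intro acc p _
  rw [← pv_cell]
  simp only [pvSelA]
  split_ifs <;> rfl
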